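-- pv_equiv track=rewrite | github.com/PriyanshuYadav012/PALB-2CSE13-2410031648 | homework/assignment-4/problem18.py | factorial_digits
-- ===== SOURCE A (Python) =====
-- def factorial_digits(n):
--     result = [1]
--
--     for num in range(2, n + 1):
--         carry = 0
--         for i in range(len(result)):
--             product = result[i] * num + carry
--             result[i] = product % 10
--             carry = product // 10
--
--         while carry:
--             result.append(carry % 10)
--             carry //= 10
--
--     return result[::-1]
-- ===== SOURCE B (Python) =====
-- def factorial_digits(n):
--     fact = 1
--     for num in range(2, n + 1):
--         fact *= num
--     digs = []
--     while fact:
--         digs.append(fact % 10)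
--         fact //= 10
--     return digs[::-1]
-- ===== Notes on version B (the rewrite author's own statement) =====
-- stated objective: faster
-- what changed: B replaces A's per-digit schoolbook multiplication with carry propagation over a digit array by a single native big-integer product followed by one divmod digit-extraction pass.
import Mathlib
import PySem

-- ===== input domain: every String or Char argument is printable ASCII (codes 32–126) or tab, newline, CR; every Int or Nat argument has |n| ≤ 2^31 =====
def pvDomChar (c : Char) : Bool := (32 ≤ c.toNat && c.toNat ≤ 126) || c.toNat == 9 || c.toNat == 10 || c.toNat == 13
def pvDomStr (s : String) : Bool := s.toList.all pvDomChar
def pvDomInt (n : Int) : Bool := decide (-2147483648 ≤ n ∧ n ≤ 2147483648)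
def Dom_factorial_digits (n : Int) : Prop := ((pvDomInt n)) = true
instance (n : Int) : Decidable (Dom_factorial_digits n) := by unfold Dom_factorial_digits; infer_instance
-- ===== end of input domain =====

-- B replaces A's digit-array schoolbook multiplication (per-digit products with carry propagation)
-- by one running big-integer product followed by a single divmod digit-extraction pass.

-- ===== PORT A =====
-- inner 'for i in range(len(result))' loop: rewrites each digit in order, threading the carry;
-- returns (updated digit list, final carry)
def pvInnerA (num : Int) : List Int → Int → List Int × Int
  | [], carry => ([], carry)
  | d :: rest, carry =>
      let product := d * num + carry
      let p := pvInnerA num rest (PySem.Int.floordiv product 10)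
      (PySem.Int.mod product 10 :: p.1, p.2)

-- 'while carry:' loop appending the remaining carry digits; the guard 0 < carry only makes it
-- total (carry is always nonnegative here; Python's loop does not terminate for negative carry)
def pvCarryA (carry : Int) : List Int :=
  if _h : 0 < carry then
    PySem.Int.mod carry 10 :: pvCarryA (PySem.Int.floordiv carry 10)
  else []
termination_by carry.toNat
decreasing_by
  rw [PySem.Int.floordiv_eq_ediv_of_pos (by norm_num : (0:Int) < 10)]
  omega

-- body of A's outer 'for num in range(2, n + 1)' loop
def pvStepA (result : List Int) (num : Int) : List Int :=
  let p := pvInnerA num result 0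
  p.1 ++ pvCarryA p.2

def factorial_digits (n : Int) : List Int :=
  let result := (PySem.List.pyRange 2 (n + 1) 1).foldl pvStepA [1]
  (PySem.List.slice? result none none (-1)).getD []  -- result[::-1]

-- ===== PORT B =====
-- 'while fact:' digit-extraction loop of Source B; the guard 0 < fact only makes it total
-- (fact is always ≥ 1 here; Python's loop does not terminate for negative fact)
def pvDigitsB (fact : Int) : List Int :=
  if _h : 0 < fact then
    PySem.Int.mod fact 10 :: pvDigitsB (PySem.Int.floordiv fact 10)
  else []
termination_by fact.toNat
decreasing_by
  rw [PySem.Int.floordiv_eq_ediv_of_pos (by norm_num : (0:Int) < 10)]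
  omega

def factorial_digits_alt (n : Int) : List Int :=
  let fact := (PySem.List.pyRange 2 (n + 1) 1).foldl (fun fact num => fact * num) 1
  (PySem.List.slice? (pvDigitsB fact) none none (-1)).getD []  -- digs[::-1]

-- ===== PRECONDITION & SPEC =====
def Spec_factorial_digits (n : Int) (out : List Int) : Prop := out = factorial_digits_alt n
instance (n : Int) (out : List Int) : Decidable (Spec_factorial_digits n out) := by unfold Spec_factorial_digits; infer_instance

-- ===== CLAIM (what is proved, stated in full; the proofs are below) =====
def Claim_equal_factorial_digits : Prop := ∀ (n : Int), Dom_factorial_digits n → Spec_factorial_digits n (factorial_digits n)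

-- ===== LEMMAS AND PROOFS =====

-- value of a little-endian digit list
def pvVal : List Int → Int
  | [] => 0
  | d :: r => d + 10 * pvVal r

-- canonical little-endian decimal representation: digits in range, nonempty, top digit nonzero
def pvCanon (L : List Int) : Prop :=
  (∀ d ∈ L, 0 ≤ d ∧ d < 10) ∧ L.getLast?.getD 0 ≠ 0

theorem pvFd (x : Int) : PySem.Int.floordiv x 10 = x / 10 :=
  PySem.Int.floordiv_eq_ediv_of_pos (by norm_num)

theorem pvMd (x : Int) : PySem.Int.mod x 10 = x % 10 :=
  PySem.Int.mod_eq_emod_of_pos (by norm_num)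

theorem pvGetLast?_cons_ne (x : Int) (l : List Int) (h : l ≠ []) :
    (x :: l).getLast? = l.getLast? := by
  have := List.getLast?_append_of_ne_nil [x] (l₂ := l) h
  simpa using this

theorem pvVal_nonneg (L : List Int) (h : ∀ d ∈ L, 0 ≤ d ∧ d < 10) : 0 ≤ pvVal L := by
  induction L with
  | nil => simp [pvVal]
  | cons d r ih =>
      have hd := h d (by simp)
      have hr := ih (fun x hx => h x (by simp [hx]))
      simp only [pvVal]; omega

theorem pvVal_pos (L : List Int) (h : pvCanon L) : 1 ≤ pvVal L := by
  induction L with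
  | nil => exact absurd rfl h.2
  | cons d r ih =>
      have hd := h.1 d (by simp)
      cases r with
      | nil =>
          have := h.2
          simp only [List.getLast?_singleton, Option.getD_some] at this
          simp only [pvVal]; omega
      | cons e s =>
          have hr : pvCanon (e :: s) := by
            refine ⟨fun x hx => h.1 x (by simp [hx]), ?_⟩
            have := h.2
            rwa [List.getLast?_cons_cons] at this
          have := ih hr
          simp only [pvVal] at *
          omega

theorem pvVal_append (a b : List Int) :
    pvVal (a ++ b) = pvVal a + 10 ^ a.length * pvVal b := by
  induction a with
  | nil => simp [pvVal]
  | cons d r ih =>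
      simp only [List.cons_append, pvVal, ih, List.length_cons, pow_succ]
      ring

-- uniqueness: pvDigitsB recovers any canonical digit list from its value
theorem pvDigitsB_val (L : List Int) (h : pvCanon L) : pvDigitsB (pvVal L) = L := by
  induction L with
  | nil => exact absurd rfl h.2
  | cons d r ih =>
      have hd := h.1 d (by simp)
      have hrn : 0 ≤ pvVal r := pvVal_nonneg r (fun x hx => h.1 x (by simp [hx]))
      have hpos : 0 < pvVal (d :: r) := pvVal_pos _ h
      rw [pvDigitsB, dif_pos hpos]
      have hv : pvVal (d :: r) = d + 10 * pvVal r := rfl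
      have hm : PySem.Int.mod (pvVal (d :: r)) 10 = d := by rw [pvMd, hv]; omega
      have hf : PySem.Int.floordiv (pvVal (d :: r)) 10 = pvVal r := by rw [pvFd, hv]; omega
      rw [hm, hf]
      cases r with
      | nil =>
          rw [show pvVal ([] : List Int) = 0 from rfl]
          rw [pvDigitsB]
          simp
      | cons e s =>
          congr 1
          apply ih
          refine ⟨fun x hx => h.1 x (by simp [hx]), ?_⟩
          have := h.2
          rwa [List.getLast?_cons_cons] at this

-- the trailing carry loop produces the canonical digits of the carry
theorem pvCarryA_spec (c : Int) (hc : 0 ≤ c) :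
    pvVal (pvCarryA c) = c ∧ (∀ d ∈ pvCarryA c, 0 ≤ d ∧ d < 10) ∧
    (c ≠ 0 → (pvCarryA c).getLast?.getD 0 ≠ 0) := by
  induction c using pvCarryA.induct with
  | case1 c hpos ih =>
      have hc' : (0:Int) ≤ PySem.Int.floordiv c 10 := by rw [pvFd]; omega
      have hrec := ih hc'
      rw [pvCarryA, dif_pos hpos]
      refine ⟨?_, ?_, ?_⟩
      · have h1 := hrec.1
        rw [pvFd] at h1
        simp only [pvVal, pvMd, pvFd]
        omega
      · intro d hd
        rcases List.mem_cons.mp hd with h1 | h2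
        · subst h1; rw [pvMd]; omega
        · exact hrec.2.1 d h2
      · intro _
        by_cases hz : PySem.Int.floordiv c 10 = 0
        · rw [hz, show pvCarryA 0 = [] from by rw [pvCarryA]; simp]
          simp only [List.getLast?_singleton, Option.getD_some]
          rw [pvMd]
          rw [pvFd] at hz
          omega
        · have h2 := hrec.2.2 hz
          have hne : pvCarryA (PySem.Int.floordiv c 10) ≠ [] := by
            intro hnil; rw [hnil] at h2; simp at h2
          rwa [pvGetLast?_cons_ne _ _ hne]
  | case2 c hpos =>
      have hc0 : c = 0 := by omega
      rw [pvCarryA, dif_neg hpos]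
      exact ⟨by simp [pvVal, hc0], by simp, fun hne => absurd hc0 hne⟩

-- the inner per-digit multiplication loop: arithmetic invariant
theorem pvInnerA_spec (num : Int) (L : List Int) (c : Int)
    (hL : ∀ d ∈ L, 0 ≤ d ∧ d < 10) (hc : 0 ≤ c) (hnum : 0 ≤ num) :
    (pvInnerA num L c).1.length = L.length ∧
    (∀ d ∈ (pvInnerA num L c).1, 0 ≤ d ∧ d < 10) ∧
    0 ≤ (pvInnerA num L c).2 ∧
    pvVal (pvInnerA num L c).1 + 10 ^ L.length * (pvInnerA num L c).2 = pvVal L * num + c ∧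
    ((pvInnerA num L c).2 = 0 →
      L.getLast?.getD 0 * num ≤ (pvInnerA num L c).1.getLast?.getD 0) := by
  induction L generalizing c with
  | nil =>
      refine ⟨rfl, by simp [pvInnerA], hc, by simp [pvInnerA, pvVal], ?_⟩
      intro h0
      simp [pvInnerA]
  | cons d rest ih =>
      have hd := hL d (by simp)
      have hprod : 0 ≤ d * num + c := add_nonneg (mul_nonneg hd.1 hnum) hc
      have hc' : (0:Int) ≤ PySem.Int.floordiv (d * num + c) 10 := by rw [pvFd]; omega
      have hrec := ih (PySem.Int.floordiv (d * num + c) 10)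
        (fun x hx => hL x (by simp [hx])) hc'
      have hA : pvInnerA num (d :: rest) c =
          (PySem.Int.mod (d * num + c) 10 ::
            (pvInnerA num rest (PySem.Int.floordiv (d * num + c) 10)).1,
           (pvInnerA num rest (PySem.Int.floordiv (d * num + c) 10)).2) := rfl
      rw [hA]
      refine ⟨by simp only [List.length_cons, hrec.1], ?_, hrec.2.2.1, ?_, ?_⟩
      · intro x hx
        rcases List.mem_cons.mp hx with h1 | h2
        · subst h1; rw [pvMd]; omega
        · exact hrec.2.1 x h2
      · have hval := hrec.2.2.2.1
        have hdm : (10:Int) * PySem.Int.floordiv (d * num + c) 10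
            + PySem.Int.mod (d * num + c) 10 = d * num + c := by rw [pvFd, pvMd]; omega
        simp only [pvVal, List.length_cons, pow_succ]
        nlinarith [hval, hdm]
      · intro hz
        simp only at hz
        cases rest with
        | nil =>
            have hB : pvInnerA num ([] : List Int)
                (PySem.Int.floordiv (d * num + c) 10) =
                ([], PySem.Int.floordiv (d * num + c) 10) := rfl
            rw [hB] at hz ⊢
            simp only [List.getLast?_singleton, Option.getD_some]
            rw [pvFd] at hz
            rw [pvMd]
            omega
        | cons e s =>
            have hlen := hrec.1
            have hne : (pvInnerA num (e :: s) (PySem.Int.floordiv (d * num + c) 10)).1 ≠ [] := by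
              intro hnil
              rw [hnil] at hlen
              simp at hlen
            rw [List.getLast?_cons_cons, pvGetLast?_cons_ne _ _ hne]
            exact hrec.2.2.2.2 hz

-- one outer-loop step preserves canonicity and multiplies the value by num
theorem pvStepA_spec (R : List Int) (num : Int) (hR : pvCanon R) (hnum : 2 ≤ num) :
    pvCanon (pvStepA R num) ∧ pvVal (pvStepA R num) = pvVal R * num := by
  have hRne : R ≠ [] := by
    intro h; subst h; exact hR.2 rfl
  have hinner := pvInnerA_spec num R 0 hR.1 le_rfl (by omega)
  have hcarry := pvCarryA_spec (pvInnerA num R 0).2 hinner.2.2.1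
  have hE : pvStepA R num = (pvInnerA num R 0).1 ++ pvCarryA (pvInnerA num R 0).2 := rfl
  have hval : pvVal (pvStepA R num) = pvVal R * num := by
    rw [hE, pvVal_append, hcarry.1, hinner.1]
    have := hinner.2.2.2.1
    omega
  refine ⟨⟨?_, ?_⟩, hval⟩
  · intro d hd
    rw [hE] at hd
    rcases List.mem_append.mp hd with h1 | h2
    · exact hinner.2.1 d h1
    · exact hcarry.2.1 d h2
  · rw [hE]
    by_cases hz : (pvInnerA num R 0).2 = 0
    · have hcnil : pvCarryA (pvInnerA num R 0).2 = [] := by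
        rw [hz, pvCarryA]; simp
      rw [hcnil, List.append_nil]
      have hlast := hinner.2.2.2.2 hz
      have hRlast : 1 ≤ R.getLast?.getD 0 := by
        have hmem : R.getLast hRne ∈ R := List.getLast_mem hRne
        have h1 := hR.1 _ hmem
        have h2 := hR.2
        rw [List.getLast?_eq_some_getLast hRne] at h2 ⊢
        simp only [Option.getD_some] at h2 ⊢
        omega
      nlinarith [hlast, hRlast]
    · have h2 := hcarry.2.2 hz
      have hne : pvCarryA (pvInnerA num R 0).2 ≠ [] := by
        intro hnil; rw [hnil] at h2; simp at h2
      rwa [List.getLast?_append_of_ne_nil _ hne]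

-- the whole outer loop: A's digit list stays canonical, its value is B's running product
theorem pvFold_spec (l : List Int) (hl : ∀ x ∈ l, 2 ≤ x) :
    ∀ R : List Int, pvCanon R →
      pvCanon (l.foldl pvStepA R) ∧
      pvVal (l.foldl pvStepA R) = l.foldl (fun fact num => fact * num) (pvVal R) := by
  induction l with
  | nil => intro R hR; exact ⟨hR, rfl⟩
  | cons x xs ih =>
      intro R hR
      have hx := hl x (by simp)
      have hstep := pvStepA_spec R x hR hx
      have := ih (fun y hy => hl y (by simp [hy])) (pvStepA R x) hstep.1
      simp only [List.foldl_cons]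
      exact ⟨this.1, by rw [this.2, hstep.2]⟩

-- ===== VERDICT (by name: the statement is the Claim_ definition above) =====
theorem factorial_digits_spec : Claim_equal_factorial_digits := by
  intro n _
  show (PySem.List.slice?
      ((PySem.List.pyRange 2 (n + 1) 1).foldl pvStepA [1]) none none (-1)).getD [] =
    (PySem.List.slice?
      (pvDigitsB ((PySem.List.pyRange 2 (n + 1) 1).foldl (fun fact num => fact * num) 1))
      none none (-1)).getD []
  have hmem : ∀ x ∈ PySem.List.pyRange 2 (n + 1) 1, 2 ≤ x := by
    intro x hx
    exact ((PySem.List.mem_pyRange_one).mp hx).1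
  have hC1 : pvCanon [1] := ⟨by intro d hd; simp at hd; omega, by simp⟩
  have hfold := pvFold_spec _ hmem [1] hC1
  have hv1 : pvVal [1] = 1 := by simp [pvVal]
  rw [hv1] at hfold
  have hB := pvDigitsB_val _ hfold.1
  rw [hfold.2] at hB
  rw [hB]
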